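-- pv_equiv track=rewrite | github.com/allenai/propara | propara/utils/end2end_grid_to_qa.py | is_this_action_seq_of_an_input
-- ===== SOURCE A (Python) =====
-- def is_this_action_seq_of_an_input(actions) -> bool:
--     for action_id, action in enumerate(actions):
--         no_create_before = 'CREATE' not in actions[0:action_id-1]
--         current_destroy = actions[action_id] == 'DESTROY'
--         no_create_move_later = 'CREATE' not in actions[action_id+1:] \
--                           and 'MOVE' not in actions[action_id + 1:]
--                           #and 'DESTROY' not in actions[action_id + 1:] \
--
--         if no_create_before and current_destroy and no_create_move_later:
--             return True
--     return False
-- ===== SOURCE B (Python) =====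
-- def is_this_action_seq_of_an_input(actions) -> bool:
--     n = len(actions)
--     first_create = n
--     last_cm = -1
--     for i, a in enumerate(actions):
--         if a == 'CREATE':
--             first_create = min(first_create, i)
--         if a == 'CREATE' or a == 'MOVE':
--             last_cm = i
--     return any(a == 'DESTROY' and last_cm < i and first_create >= i - 1
--                for i, a in enumerate(actions))
-- ===== Notes on version B (the rewrite author's own statement) =====
-- stated objective: faster
-- what changed: Replaced the per-index slice scans ('CREATE' in prefix, 'CREATE'/'MOVE' in suffix, rebuilt for every index) by one pass that precomputes the first CREATE index and the last CREATE/MOVE index, then a single any() comparing each DESTROY index against those two numbers.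
import Mathlib
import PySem

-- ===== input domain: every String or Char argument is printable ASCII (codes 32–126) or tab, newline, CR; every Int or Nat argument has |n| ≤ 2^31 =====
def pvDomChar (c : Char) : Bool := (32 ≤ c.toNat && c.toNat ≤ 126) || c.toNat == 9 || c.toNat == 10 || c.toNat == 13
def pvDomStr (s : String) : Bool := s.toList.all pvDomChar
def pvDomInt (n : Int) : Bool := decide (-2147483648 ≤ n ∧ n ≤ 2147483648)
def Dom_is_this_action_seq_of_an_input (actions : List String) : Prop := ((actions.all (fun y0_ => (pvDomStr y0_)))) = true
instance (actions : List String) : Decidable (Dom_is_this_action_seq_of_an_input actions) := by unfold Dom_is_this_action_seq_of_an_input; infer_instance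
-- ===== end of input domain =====

-- B replaces A's per-index prefix/suffix slice scans by one pass precomputing the first CREATE
-- index and the last CREATE/MOVE index, then a single any() over the indices (objective: faster).

-- ===== PORT A =====
-- loop body of A: the three conditions computed for one enumerated element (action_id, action)
def aCheck (actions : List String) (p : Int × String) : Bool :=
  let no_create_before := !((PySem.List.slice actions (some 0) (some (p.1 - 1))).contains "CREATE")
  let current_destroy := PySem.List.pyGet? actions p.1 == some "DESTROY"
  let no_create_move_later :=
    !((PySem.List.slice actions (some (p.1 + 1)) none).contains "CREATE")
    && !((PySem.List.slice actions (some (p.1 + 1)) none).contains "MOVE")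
  no_create_before && current_destroy && no_create_move_later

-- the 'for ... return True / return False' loop is List.any
def is_this_action_seq_of_an_input (actions : List String) : Bool :=
  (PySem.List.enumerate actions 0).any (aCheck actions)

-- ===== PORT B =====
-- loop body of Source B: update (first_create, last_cm) from one enumerated element
def altStep (st : Int × Int) (p : Int × String) : Int × Int :=
  (if p.2 == "CREATE" then min st.1 p.1 else st.1,
   if p.2 == "CREATE" || p.2 == "MOVE" then p.1 else st.2)

-- body of Source B's any(): one comparison of the index against the two precomputed numbers
def bCheck (st : Int × Int) (p : Int × String) : Bool :=
  p.2 == "DESTROY" && decide (st.2 < p.1) && decide (st.1 ≥ p.1 - 1)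

def is_this_action_seq_of_an_input_alt (actions : List String) : Bool :=
  let n : Int := actions.length
  let st := (PySem.List.enumerate actions 0).foldl altStep (n, -1)
  (PySem.List.enumerate actions 0).any (bCheck st)

-- ===== PRECONDITION & SPEC =====
def Spec_is_this_action_seq_of_an_input (actions : List String) (out : Bool) : Prop := out = is_this_action_seq_of_an_input_alt actions
instance (actions : List String) (out : Bool) : Decidable (Spec_is_this_action_seq_of_an_input actions out) := by unfold Spec_is_this_action_seq_of_an_input; infer_instance

-- ===== CLAIM (what is proved, stated in full; the proofs are below) =====
def Claim_equal_is_this_action_seq_of_an_input : Prop := ∀ (actions : List String), Dom_is_this_action_seq_of_an_input actions → Spec_is_this_action_seq_of_an_input actions (is_this_action_seq_of_an_input actions)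

-- ===== LEMMAS AND PROOFS =====

-- the common characterisation both loop bodies are reduced to
def Good (l : List String) (k : Nat) (hk : k < l.length) : Prop :=
  l[k] = "DESTROY" ∧ (∀ (j : Nat) (h : j < l.length), l[j] = "CREATE" → k ≤ j + 1) ∧
    (∀ (j : Nat) (h : j < l.length), (l[j] = "CREATE" ∨ l[j] = "MOVE") → j < k)

theorem any_enum (l : List String) (f : Int × String → Bool) :
    ((PySem.List.enumerate l 0).any f = true) ↔
      ∃ (k : Nat) (h : k < l.length), f ((k : Int), l[k]) = true := by
  simp [List.any_eq_true, PySem.List.mem_enumerate_iff]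

theorem altStep_fst_lt (l : List String) (s fc lc t : Int) :
    (((PySem.List.enumerate l s).foldl altStep (fc, lc)).1 < t) ↔
      (fc < t ∨ ∃ (j : Nat) (h : j < l.length), l[j] = "CREATE" ∧ s + j < t) := by
  induction l generalizing s fc lc with
  | nil => simp [PySem.List.enumerate_nil]
  | cons a l ih =>
    rw [PySem.List.enumerate_cons, List.foldl_cons]
    by_cases ha : a = "CREATE"
    · simp only [altStep, ha, BEq.rfl, if_true, ih]
      constructor
      · rintro (h | ⟨j, hj, hc, hlt⟩)
        · by_cases h' : fc < t
          · left; exact h'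
          · right
            exact ⟨0, by simp only [List.length_cons]; omega, by simpa using ha,
              by push_cast; omega⟩
        · right
          exact ⟨j + 1, by simp only [List.length_cons]; omega, by simpa using hc,
            by push_cast at hlt ⊢; omega⟩
      · rintro (h | ⟨j, hj, hc, hlt⟩)
        · left; omega
        · rcases j with _ | j
          · left; simp only [Nat.cast_zero, add_zero] at hlt; omega
          · right
            exact ⟨j, by simp only [List.length_cons] at hj; omega, by simpa using hc,
              by push_cast at hlt ⊢; omega⟩
    · have hb : (a == "CREATE") = false := by simpa using ha
      simp only [altStep, hb, Bool.false_eq_true, if_false, ih]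
      constructor
      · rintro (h | ⟨j, hj, hc, hlt⟩)
        · left; exact h
        · right
          exact ⟨j + 1, by simp only [List.length_cons]; omega, by simpa using hc,
            by push_cast at hlt ⊢; omega⟩
      · rintro (h | ⟨j, hj, hc, hlt⟩)
        · left; exact h
        · rcases j with _ | j
          · simp only [List.getElem_cons_zero] at hc; exact absurd hc ha
          · right
            exact ⟨j, by simp only [List.length_cons] at hj; omega, by simpa using hc,
              by push_cast at hlt ⊢; omega⟩

theorem altStep_snd_lt (l : List String) (s fc lc t : Int) :
    (((PySem.List.enumerate l s).foldl altStep (fc, lc)).2 < t) ↔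
      ((∀ (j : Nat) (h : j < l.length), ¬(l[j] = "CREATE" ∨ l[j] = "MOVE")) → lc < t) ∧
        (∀ (j : Nat) (h : j < l.length), (l[j] = "CREATE" ∨ l[j] = "MOVE") → s + j < t) := by
  induction l generalizing s fc lc with
  | nil => simp [PySem.List.enumerate_nil]
  | cons a l ih =>
    rw [PySem.List.enumerate_cons, List.foldl_cons]
    by_cases ha : a = "CREATE" ∨ a = "MOVE"
    · have hb : (a == "CREATE" || a == "MOVE") = true := by
        rcases ha with h | h <;> simp [h]
      simp only [altStep, hb, if_true, ih]
      constructor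
      · rintro ⟨h1, h2⟩
        refine ⟨fun h => absurd ha (by simpa using h 0 (by simp)), ?_⟩
        intro j hj hcm
        rcases j with _ | j
        · by_cases hE : ∀ (j : Nat) (h : j < l.length), ¬(l[j] = "CREATE" ∨ l[j] = "MOVE")
          · have := h1 hE; push_cast; omega
          · push_neg at hE
            obtain ⟨j0, hj0, hcm0⟩ := hE
            have := h2 j0 hj0 (by tauto)
            push_cast; omega
        · have := h2 j (by simp only [List.length_cons] at hj; omega) (by simpa using hcm)
          push_cast at this ⊢; omega
      · rintro ⟨_, h2⟩
        refine ⟨fun _ => ?_, fun j hj hcm => ?_⟩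
        · have := h2 0 (by simp) (by simpa using ha); simpa using this
        · have := h2 (j + 1) (by simp only [List.length_cons]; omega) (by simpa using hcm)
          push_cast at this ⊢; omega
    · have hb : (a == "CREATE" || a == "MOVE") = false := by
        push_neg at ha; simp [ha.1, ha.2]
      simp only [altStep, hb, Bool.false_eq_true, if_false, ih]
      constructor
      · rintro ⟨h1, h2⟩
        refine ⟨fun h => h1 (fun j hj => by simpa using h (j + 1) (by simp only [List.length_cons]; omega)), ?_⟩
        intro j hj hcm
        rcases j with _ | j
        · exact absurd (by simpa using hcm) ha
        · have := h2 j (by simp only [List.length_cons] at hj; omega) (by simpa using hcm)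
          push_cast at this ⊢; omega
      · rintro ⟨h1, h2⟩
        refine ⟨fun h => h1 ?_, fun j hj hcm => ?_⟩
        · intro j hj
          rcases j with _ | j
          · simpa using ha
          · simpa using h j (by simp only [List.length_cons] at hj; omega)
        · have := h2 (j + 1) (by simp only [List.length_cons]; omega) (by simpa using hcm)
          push_cast at this ⊢; omega

-- membership ↔ indexed existence, for the three window shapes A uses
theorem mem_take_iff (l : List String) (m : Nat) (x : String) :
    x ∈ l.take m ↔ ∃ (j : Nat) (h : j < l.length), j < m ∧ l[j] = x := by
  constructor
  · intro h
    obtain ⟨j, hj, he⟩ := List.mem_iff_getElem.1 h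
    have hj' : j < l.length ∧ j < m := by
      have := hj; simp only [List.length_take] at this; omega
    exact ⟨j, hj'.1, hj'.2, by rw [← he]; simp⟩
  · rintro ⟨j, hj, hm, he⟩
    exact List.mem_iff_getElem.2 ⟨j, by simp only [List.length_take]; omega,
      by simp [List.getElem_take, he]⟩

theorem mem_drop_iff (l : List String) (m : Nat) (x : String) :
    x ∈ l.drop m ↔ ∃ (j : Nat) (h : j < l.length), m ≤ j ∧ l[j] = x := by
  constructor
  · intro h
    obtain ⟨j, hj, he⟩ := List.mem_iff_getElem.1 h
    have hj' : m + j < l.length := by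
      have := hj; simp only [List.length_drop] at this; omega
    exact ⟨m + j, hj', by omega, by rw [← he]; simp⟩
  · rintro ⟨j, hj, hm, he⟩
    refine List.mem_iff_getElem.2 ⟨j - m, by simp only [List.length_drop]; omega, ?_⟩
    rw [List.getElem_drop]
    simp only [show m + (j - m) = j by omega]
    exact he

theorem mem_dropLast_iff (l : List String) (x : String) :
    x ∈ l.dropLast ↔ ∃ (j : Nat) (h : j < l.length), j + 1 < l.length ∧ l[j] = x := by
  constructor
  · intro h
    obtain ⟨j, hj, he⟩ := List.mem_iff_getElem.1 h
    have hj' : j + 1 < l.length := by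
      have := hj; simp only [List.length_dropLast] at this; omega
    exact ⟨j, by omega, hj', by rw [← he]; simp [List.getElem_dropLast]⟩
  · rintro ⟨j, hj, hm, he⟩
    exact List.mem_iff_getElem.2 ⟨j, by simp only [List.length_dropLast]; omega,
      by simp [List.getElem_dropLast, he]⟩

theorem condA_iff (l : List String) (k : Nat) (hk : k < l.length) :
    (aCheck l ((k : Int), l[k]) = true) ↔ Good l k hk := by
  have hget : PySem.List.pyGet? l (k : Int) = some l[k] := by
    rw [PySem.List.pyGet?_natCast, List.getElem?_eq_getElem hk]
  have hsuf : PySem.List.slice l (some ((k : Int) + 1)) none = l.drop (k + 1) := by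
    have h1 : ((k : Int) + 1) = (((k + 1 : Nat)) : Int) := by push_cast; ring
    rw [h1, PySem.List.slice_from_natCast]
  have hdc : ("DESTROY" : String) ≠ "CREATE" := by decide
  have hdm : ("DESTROY" : String) ≠ "MOVE" := by decide
  have hcf : ∀ (ys : List String) (x : String), ((ys.contains x) = false) ↔ x ∉ ys := by
    intro ys x; simp
  rcases Nat.eq_zero_or_pos k with hk0 | hkpos
  · subst hk0
    have hpre : PySem.List.slice l (some 0) (some (((0 : Nat) : Int) - 1)) = l.dropLast := by
      have h1 : (((0 : Nat) : Int) - 1) = (-1 : Int) := by norm_num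
      rw [h1, PySem.List.slice_zero_start, PySem.List.slice_to_neg_one]
    simp only [aCheck, hget, hpre, hsuf, Bool.and_eq_true, Bool.not_eq_true',
      beq_iff_eq, Option.some.injEq, hcf]
    unfold Good
    constructor
    · rintro ⟨⟨hp, hd⟩, hc, hm⟩
      refine ⟨hd, fun j hj _ => by omega, ?_⟩
      intro j hj hcm
      exfalso
      rcases j with _ | j
      · rcases hcm with h | h
        · exact hdc (hd.symm.trans h)
        · exact hdm (hd.symm.trans h)
      · rcases hcm with h | h
        · exact hc ((mem_drop_iff l (0 + 1) "CREATE").2 ⟨j + 1, hj, by omega, h⟩)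
        · exact hm ((mem_drop_iff l (0 + 1) "MOVE").2 ⟨j + 1, hj, by omega, h⟩)
    · rintro ⟨hd, _, hcm⟩
      refine ⟨⟨?_, hd⟩, ?_, ?_⟩
      · intro hmem
        obtain ⟨j, hj, hlt, he⟩ := (mem_dropLast_iff l "CREATE").1 hmem
        have := hcm j hj (Or.inl he); omega
      · intro hmem
        obtain ⟨j, hj, hge, he⟩ := (mem_drop_iff l (0 + 1) "CREATE").1 hmem
        have := hcm j hj (Or.inl he); omega
      · intro hmem
        obtain ⟨j, hj, hge, he⟩ := (mem_drop_iff l (0 + 1) "MOVE").1 hmem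
        have := hcm j hj (Or.inr he); omega
  · have hpre : PySem.List.slice l (some 0) (some ((k : Int) - 1)) = l.take (k - 1) := by
      have h1 : ((k : Int) - 1) = (((k - 1 : Nat)) : Int) := by omega
      rw [h1, PySem.List.slice_zero_start, PySem.List.slice_to_natCast]
    simp only [aCheck, hget, hpre, hsuf, Bool.and_eq_true, Bool.not_eq_true',
      beq_iff_eq, Option.some.injEq, hcf]
    unfold Good
    constructor
    · rintro ⟨⟨hp, hd⟩, hc, hm⟩
      refine ⟨hd, ?_, ?_⟩
      · intro j hj hcj
        by_contra hlt
        exact hp ((mem_take_iff l (k - 1) "CREATE").2 ⟨j, hj, by omega, hcj⟩)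
      · intro j hj hcm
        by_contra hge
        rcases Nat.lt_or_ge j (k + 1) with hlt | hge'
        · have hkj : j = k := by omega
          subst hkj
          rcases hcm with h | h
          · exact hdc (hd.symm.trans h)
          · exact hdm (hd.symm.trans h)
        · rcases hcm with h | h
          · exact hc ((mem_drop_iff l (k + 1) "CREATE").2 ⟨j, hj, by omega, h⟩)
          · exact hm ((mem_drop_iff l (k + 1) "MOVE").2 ⟨j, hj, by omega, h⟩)
    · rintro ⟨hd, hpre', hcm⟩
      refine ⟨⟨?_, hd⟩, ?_, ?_⟩
      · intro hmem
        obtain ⟨j, hj, hlt, he⟩ := (mem_take_iff l (k - 1) "CREATE").1 hmem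
        have := hpre' j hj he; omega
      · intro hmem
        obtain ⟨j, hj, hge, he⟩ := (mem_drop_iff l (k + 1) "CREATE").1 hmem
        have := hcm j hj (Or.inl he); omega
      · intro hmem
        obtain ⟨j, hj, hge, he⟩ := (mem_drop_iff l (k + 1) "MOVE").1 hmem
        have := hcm j hj (Or.inr he); omega

theorem condB_iff (l : List String) (k : Nat) (hk : k < l.length) :
    (bCheck ((PySem.List.enumerate l 0).foldl altStep ((l.length : Int), -1)) ((k : Int), l[k]) = true)
      ↔ Good l k hk := by
  unfold bCheck Good
  simp only [Bool.and_eq_true, beq_iff_eq, decide_eq_true_eq]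
  rw [altStep_snd_lt, ge_iff_le, ← not_lt, altStep_fst_lt]
  constructor
  · rintro ⟨⟨hd, ⟨-, hcm⟩⟩, hnc⟩
    push_neg at hnc
    obtain ⟨-, hc⟩ := hnc
    refine ⟨hd, ?_, ?_⟩
    · intro j hj hcj
      have h2 := hc j hj hcj
      omega
    · intro j hj hcm'
      have := hcm j hj hcm'
      omega
  · rintro ⟨hd, hpre, hcm⟩
    refine ⟨⟨hd, ⟨fun _ => by omega, fun j hj h => by have := hcm j hj h; omega⟩⟩, ?_⟩
    intro h
    rcases h with h | ⟨j, hj, hcj, hlt⟩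
    · omega
    · have := hpre j hj hcj; omega

theorem main_equiv (l : List String) :
    is_this_action_seq_of_an_input l = is_this_action_seq_of_an_input_alt l := by
  rw [Bool.eq_iff_iff]
  show ((PySem.List.enumerate l 0).any (aCheck l) = true) ↔
      ((PySem.List.enumerate l 0).any
        (bCheck ((PySem.List.enumerate l 0).foldl altStep ((l.length : Int), -1))) = true)
  rw [any_enum, any_enum]
  constructor
  · rintro ⟨k, hk, h⟩
    exact ⟨k, hk, (condB_iff l k hk).2 ((condA_iff l k hk).1 h)⟩
  · rintro ⟨k, hk, h⟩
    exact ⟨k, hk, (condA_iff l k hk).2 ((condB_iff l k hk).1 h)⟩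

-- ===== VERDICT (by name: the statement is the Claim_ definition above) =====
theorem is_this_action_seq_of_an_input_spec : Claim_equal_is_this_action_seq_of_an_input := by
  intro actions _
  unfold Spec_is_this_action_seq_of_an_input
  exact main_equiv actions
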